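-- pv_equiv track=rewrite | github.com/msorins/Computational-Logic-Y1S1 | OptionalHomework/numerationBasesModule/classes/numerationBases.py | sub
-- ===== SOURCE A (Python) =====
-- def sub(a, b, base):
--     '''
--     :param a: vector (is greater than b)
--     :param b: vector
--     :param base: numeration base
--     :return: a vector containing the substraction of a and b
--     '''
--     result = []
--     t = 0
--
--     for i in range(len(a) - len(b)):
--         b.append(0)
--
--     for i in range(max(len(a), len(b))):
--         newRes = a[i] - b[i] - t
--
--         if newRes < 0:
--             t = 1
--             newRes = newRes + base
--         else:
--             t = 0
--
--         result.append(newRes)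
--
--     while result[len(result) -1] == 0:
--         result.pop(len(result) - 1)
--
--     return result
-- ===== SOURCE B (Python) =====
-- def sub(a, b, base):
--     # Two-pass formulation: first a scan that materialises the borrow chain,
--     # then a comprehension computing each digit arithmetically (d - t + base*s),
--     # and a guarded trailing-zero trim.  Unlike A, b is NOT mutated (A appends
--     # padding zeros to b in place); return values agree on the stated domain.
--     pairs = list(zip(a, b + [0] * (len(a) - len(b))))
--     borrows = [0]
--     for x, y in pairs:
--         borrows.append(1 if x - y - borrows[-1] < 0 else 0)
--     out = [x - y - t + base * s
--            for (x, y), t, s in zip(pairs, borrows, borrows[1:])]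
--     rev = out[::-1]
--     while rev and rev[0] == 0:
--         rev = rev[1:]
--     return rev[::-1]
-- ===== Notes on version B (the rewrite author's own statement) =====
-- stated objective: alternative
-- what changed: A interleaves borrow propagation, digit construction and index arithmetic in one loop over range(max(len)) after padding b in place, then trims with an unguarded pop loop; B zips the operand pairs, materialises the borrow chain with a scan, computes every digit arithmetically (d - t + base*s) in a comprehension, and trims trailing zeros by slicing the reversed list (b is not mutated).
import Mathlib
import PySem

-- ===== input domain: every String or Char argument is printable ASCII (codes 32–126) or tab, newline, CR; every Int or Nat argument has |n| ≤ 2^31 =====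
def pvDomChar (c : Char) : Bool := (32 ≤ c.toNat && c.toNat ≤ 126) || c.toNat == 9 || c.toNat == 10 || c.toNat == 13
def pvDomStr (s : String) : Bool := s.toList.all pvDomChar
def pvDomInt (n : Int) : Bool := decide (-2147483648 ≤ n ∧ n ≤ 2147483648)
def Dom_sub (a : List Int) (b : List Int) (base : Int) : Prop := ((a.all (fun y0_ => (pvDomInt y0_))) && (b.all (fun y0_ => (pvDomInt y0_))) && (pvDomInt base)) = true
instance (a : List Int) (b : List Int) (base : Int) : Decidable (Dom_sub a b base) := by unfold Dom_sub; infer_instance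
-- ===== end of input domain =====

-- B re-states the digit subtraction as a borrow-chain scan followed by an arithmetic
-- comprehension (objective: alternative decomposition, same cost); NOTE on side effects:
-- A pads the caller's list b with zeros in place, B does not mutate b — the equivalence
-- proved here is about the return value only.

-- ===== PORT A =====
-- Python 'while result[len(result)-1] == 0: result.pop(...)'; on an all-zero result
-- Python pops the list empty and then raises IndexError — excluded by Pre_sub
-- (the port returns [] there).
def subTrimA (r : List Int) : List Int :=
  match r with
  | [] => []
  | x :: xs =>
    if (x :: xs).getLastD 0 == 0 then subTrimA (x :: xs).dropLast else x :: xs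
termination_by r.length
decreasing_by simp

def sub (a : List Int) (b : List Int) (base : Int) : List Int :=
  -- for i in range(len(a) - len(b)): b.append(0)   (empty range when len(b) ≥ len(a))
  let b' := b ++ List.replicate (a.length - b.length) 0
  let n := max a.length b'.length
  -- a[i], b[i]: in range for every i < n under Pre_sub (len b ≤ len a);
  -- when len(b) > len(a) Python raises IndexError — excluded by Pre_sub
  let st := (List.range n).foldl (fun (st : List Int × Int) i =>
      let newRes := a.getD i 0 - b'.getD i 0 - st.2
      if newRes < 0 then (st.1 ++ [newRes + base], 1) else (st.1 ++ [newRes], 0))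
    ([], 0)
  subTrimA st.1

-- ===== PORT B =====
-- Python 'while rev and rev[0] == 0: rev = rev[1:]'
def subTrimB : List Int → List Int
  | [] => []
  | x :: xs => if x == 0 then subTrimB xs else x :: xs

def sub_alt (a : List Int) (b : List Int) (base : Int) : List Int :=
  let pairs := a.zip (b ++ List.replicate (a.length - b.length) 0)
  let borrows := pairs.foldl
    (fun bs p => bs ++ [if p.1 - p.2 - bs.getLastD 0 < 0 then (1 : Int) else 0]) [(0 : Int)]
  let out := (pairs.zip (borrows.zip borrows.tail)).map
    (fun q => q.1.1 - q.1.2 - q.2.1 + base * q.2.2)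
  (subTrimB out.reverse).reverse

-- ===== PRECONDITION & SPEC =====
-- Whether every digit A computes is zero; this depends on the whole borrow chain,
-- so it is stated as this recursion over the (padded) digit pairs.
def subAllZero : List Int → List Int → Int → Int → Bool
  | [], _, _, _ => true
  | _ :: _, [], _, _ => true   -- not reached: Pre_sub pads the second list to the first's length
  | x :: xs, y :: ys, base, t =>
    let d := x - y - t
    if d < 0 then d + base == 0 && subAllZero xs ys base 1
    else d == 0 && subAllZero xs ys base 0

-- Pre_sub excludes exactly the inputs where Python A raises IndexError:
-- len(b) > len(a) (the loop indexes a[i] past its end), and inputs whose digit-wise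
-- difference is all zeros (the trim loop pops the result empty, then indexes it).
def Pre_sub (a : List Int) (b : List Int) (base : Int) : Prop :=
  b.length ≤ a.length ∧
  subAllZero a (b ++ List.replicate (a.length - b.length) 0) base 0 = false

instance (a : List Int) (b : List Int) (base : Int) : Decidable (Pre_sub a b base) := by
  unfold Pre_sub; infer_instance

def pvWitness_sub : List Int × List Int × Int := ([3, 1], [1], 10)

def Spec_sub (a : List Int) (b : List Int) (base : Int) (out : List Int) : Prop := out = sub_alt a b base
instance (a : List Int) (b : List Int) (base : Int) (out : List Int) : Decidable (Spec_sub a b base out) := by unfold Spec_sub; infer_instance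

-- ===== CLAIM (what is proved, stated in full; the proofs are below) =====
def Claim_equal_sub : Prop := ∀ (a : List Int) (b : List Int) (base : Int), Dom_sub a b base → Pre_sub a b base → Spec_sub a b base (sub a b base)

-- ===== LEMMAS AND PROOFS =====

-- reference form of the digit list, shared target of both ports' loops
def subGoR (base : Int) : List (Int × Int) → Int → List Int
  | [], _ => []
  | p :: ps, t =>
    let d := p.1 - p.2 - t
    if d < 0 then (d + base) :: subGoR base ps 1 else d :: subGoR base ps 0

def subScan : List (Int × Int) → Int → List Int
  | [], _ => []
  | p :: ps, t =>
    let s : Int := if p.1 - p.2 - t < 0 then 1 else 0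
    s :: subScan ps s

theorem subScan_foldl (ps : List (Int × Int)) (bs : List Int) (t : Int)
    (h : bs.getLastD 0 = t) :
    ps.foldl (fun bs p => bs ++ [if p.1 - p.2 - bs.getLastD 0 < 0 then (1 : Int) else 0]) bs
      = bs ++ subScan ps t := by
  induction ps generalizing bs t with
  | nil => simp [subScan]
  | cons p ps ih =>
    simp only [List.foldl_cons, subScan, h]
    rw [ih (bs ++ [if p.1 - p.2 - t < 0 then (1 : Int) else 0])
          (if p.1 - p.2 - t < 0 then (1 : Int) else 0) (by simp)]
    simp

theorem subScan_map (base : Int) (ps : List (Int × Int)) (t : Int) :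
    ((ps.zip ((t :: subScan ps t).zip (subScan ps t))).map
        (fun q => q.1.1 - q.1.2 - q.2.1 + base * q.2.2))
      = subGoR base ps t := by
  induction ps generalizing t with
  | nil => simp [subScan, subGoR]
  | cons p ps ih =>
    simp only [subScan, subGoR]
    by_cases hd : p.1 - p.2 - t < 0
    · simp only [if_pos hd, List.zip_cons_cons, List.map_cons, ih]
      ring_nf
    · simp only [if_neg hd, List.zip_cons_cons, List.map_cons, ih]
      ring_nf

theorem subLoopA_eq (base : Int) :
    ∀ (xs ys : List Int) (t : Int) (acc : List Int), xs.length = ys.length →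
    ((List.range xs.length).foldl (fun (st : List Int × Int) i =>
        let d := xs.getD i 0 - ys.getD i 0 - st.2
        if d < 0 then (st.1 ++ [d + base], 1) else (st.1 ++ [d], 0))
      (acc, t)).1
    = acc ++ subGoR base (xs.zip ys) t := by
  intro xs
  induction xs with
  | nil => intro ys t acc _; simp [subGoR]
  | cons x xs ih =>
    intro ys t acc hlen
    cases ys with
    | nil => simp at hlen
    | cons y ys =>
      rw [List.length_cons, List.range_succ_eq_map, List.foldl_cons, List.foldl_map]
      simp only [List.getD_cons_zero, List.getD_cons_succ, List.zip_cons_cons, subGoR]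
      by_cases hd : x - y - t < 0
      · simp only [if_pos hd]
        rw [ih ys 1 (acc ++ [x - y - t + base]) (by simpa using hlen)]
        simp
      · simp only [if_neg hd]
        rw [ih ys 0 (acc ++ [x - y - t]) (by simpa using hlen)]
        simp

theorem subTrimA_concat (ys : List Int) (y : Int) :
    subTrimA (ys ++ [y]) = if y == 0 then subTrimA ys else ys ++ [y] := by
  rcases ys with _ | ⟨z, zs⟩
  · by_cases hy : y = 0 <;> simp [subTrimA, hy]
  · rw [List.cons_append, subTrimA]
    rw [← List.cons_append, List.getLastD_concat, List.dropLast_concat]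

theorem subTrim_eq (r : List Int) : subTrimA r = (subTrimB r.reverse).reverse := by
  induction r using List.reverseRecOn with
  | nil => simp [subTrimA, subTrimB]
  | append_singleton ys y ih =>
    rw [subTrimA_concat, List.reverse_append]
    by_cases hy : y = 0
    · simpa [subTrimB, hy] using ih
    · simp [subTrimB, hy]

-- ===== VERDICT (by name: the statement is the Claim_ definition above) =====
theorem sub_spec : Claim_equal_sub := by
  intro a b base _ hpre
  obtain ⟨hle, -⟩ := hpre
  show sub a b base = sub_alt a b base
  have hlen : (b ++ List.replicate (a.length - b.length) 0).length = a.length := by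
    simp; omega
  unfold sub sub_alt
  rw [subTrim_eq]
  congr 2
  rw [hlen, Nat.max_self, subLoopA_eq base a _ 0 [] hlen.symm,
      subScan_foldl _ [(0 : Int)] 0 (by simp)]
  simp only [List.nil_append, List.singleton_append, List.tail_cons]
  exact congrArg List.reverse (subScan_map base _ 0).symm
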